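-- pv_equiv track=rewrite | github.com/paulwang19/ctf-writeups | HTB_Cyber_Apocalypse_CTF_2025/files/enchanted_cipher.py | get_valid_group_str
-- ===== SOURCE A (Python) =====
-- def get_valid_group_str(full_str, start_retrieve_index):
--     count = 0
--     group_str = ''
--     for i in range(start_retrieve_index, len(full_str)):
--         group_str += full_str[i]
--         if str.isalpha(full_str[i]):
--             count += 1
--             if count == 5:
--                 break
--
--     return group_str
-- ===== SOURCE B (Python) =====
-- def get_valid_group_str(full_str, start_retrieve_index):
--     chars = [full_str[i] for i in range(start_retrieve_index, len(full_str))]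
--     alpha = [j for j, c in enumerate(chars) if c.isalpha()]
--     end = alpha[4] + 1 if len(alpha) >= 5 else len(chars)
--     return ''.join(chars[:end])
-- ===== Notes on version B (the rewrite author's own statement) =====
-- stated objective: alternative
-- what changed: B materialises the scanned character region once, builds an index table of alphabetic positions, and answers with a single slice at the 5th alpha position (or the whole region), instead of A's char-by-char accumulation with a running counter and early break.
import Mathlib
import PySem

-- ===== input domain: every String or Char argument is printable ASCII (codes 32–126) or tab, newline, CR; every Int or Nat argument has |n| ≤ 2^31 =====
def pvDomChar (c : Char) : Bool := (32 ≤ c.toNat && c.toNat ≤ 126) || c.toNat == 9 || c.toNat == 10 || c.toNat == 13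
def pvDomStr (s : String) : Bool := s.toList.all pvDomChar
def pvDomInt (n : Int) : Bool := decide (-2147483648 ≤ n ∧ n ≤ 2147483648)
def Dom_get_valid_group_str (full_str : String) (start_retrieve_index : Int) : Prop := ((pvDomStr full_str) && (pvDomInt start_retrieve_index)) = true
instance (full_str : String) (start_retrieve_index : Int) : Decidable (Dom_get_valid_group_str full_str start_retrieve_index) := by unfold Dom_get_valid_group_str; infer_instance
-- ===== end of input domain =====

-- B builds the scanned region and an alpha-position index table once and answers with one slice,
-- instead of A's char-by-char accumulation with a counter and early break; objective: alternative decomposition.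

-- ===== PORT A =====
-- A's loop state: (count, group_str); break after appending the 5th alphabetic character.
def pvALoop (s : List Char) (idxs : List Int) (count : Int) (acc : List Char) : List Char :=
  match idxs with
  | [] => acc
  | i :: rest =>
    match PySem.List.pyGet? s i with
    | none => acc   -- IndexError in Python; excluded by Pre_
    | some c =>
      if PySem.Chars.isalpha c then
        if count + 1 = 5 then acc ++ [c]
        else pvALoop s rest (count + 1) (acc ++ [c])
      else pvALoop s rest count (acc ++ [c])

def get_valid_group_str (full_str : String) (start_retrieve_index : Int) : String :=
  String.ofList (pvALoop full_str.toList
    (PySem.List.pyRange start_retrieve_index ((full_str.toList.length : Int)) 1) 0 [])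

-- ===== PORT B =====
-- chars = [full_str[i] for i in range(start, len)]: filterMap is exact under Pre_ (no index error occurs).
def get_valid_group_str_alt (full_str : String) (start_retrieve_index : Int) : String :=
  let chars := (PySem.List.pyRange start_retrieve_index ((full_str.toList.length : Int)) 1).filterMap
      (PySem.List.pyGet? full_str.toList)
  let alpha := ((PySem.List.enumerate chars 0).filter (fun p => PySem.Chars.isalpha p.2)).map (fun p => p.1)
  let endIdx : Int := if 5 ≤ alpha.length then alpha.getD 4 0 + 1 else (chars.length : Int)
  String.ofList (chars.take endIdx.toNat)

-- ===== PRECONDITION & SPEC =====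
-- Pre_ excludes exactly the inputs where Python A (and B alike) raises IndexError: start index below -len(full_str).
def Pre_get_valid_group_str (full_str : String) (start_retrieve_index : Int) : Prop :=
  -(full_str.toList.length : Int) ≤ start_retrieve_index
instance (full_str : String) (start_retrieve_index : Int) : Decidable (Pre_get_valid_group_str full_str start_retrieve_index) := by
  unfold Pre_get_valid_group_str; infer_instance
def pvWitness_get_valid_group_str : String × Int := ("Hello, world!", 0)

def Spec_get_valid_group_str (full_str : String) (start_retrieve_index : Int) (out : String) : Prop :=
  out = get_valid_group_str_alt full_str start_retrieve_index
instance (full_str : String) (start_retrieve_index : Int) (out : String) : Decidable (Spec_get_valid_group_str full_str start_retrieve_index out) := by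
  unfold Spec_get_valid_group_str; infer_instance

-- ===== CLAIM =====
def Claim_equal_get_valid_group_str : Prop := ∀ (full_str : String) (start_retrieve_index : Int), Dom_get_valid_group_str full_str start_retrieve_index → Pre_get_valid_group_str full_str start_retrieve_index → Spec_get_valid_group_str full_str start_retrieve_index (get_valid_group_str full_str start_retrieve_index)

-- ===== LEMMAS AND PROOFS =====

-- The char-level model both ports reduce to: keep characters up to and including the n-th alphabetic one
-- (all of them if fewer than n alphabetic characters occur).
def pvCut (n : Nat) : List Char → List Char
  | [] => []
  | c :: cs =>
    if PySem.Chars.isalpha c then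
      (if n ≤ 1 then [c] else c :: pvCut (n - 1) cs)
    else c :: pvCut n cs

lemma pvALoop_eq_cut (s : List Char) :
    ∀ (idxs : List Int) (r : List Char) (n : Nat) (acc : List Char),
      idxs.map (PySem.List.pyGet? s) = r.map some → 1 ≤ n → n ≤ 5 →
      pvALoop s idxs (5 - (n : Int)) acc = acc ++ pvCut n r := by
  intro idxs
  induction idxs with
  | nil =>
    intro r n acc hmap _ _
    cases r with
    | nil => simp [pvALoop, pvCut]
    | cons c cs => simp at hmap
  | cons i rest ih =>
    intro r n acc hmap hn1 hn5
    cases r with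
    | nil => simp at hmap
    | cons c cs =>
      simp only [List.map_cons, List.cons.injEq] at hmap
      obtain ⟨hi, hrest⟩ := hmap
      simp only [pvALoop, hi]
      by_cases hc : PySem.Chars.isalpha c = true
      · by_cases h5 : n = 1
        · have : (5 : Int) - (n : Int) + 1 = 5 := by omega
          simp [hc, pvCut, h5]
        · have hne : ¬ ((5 : Int) - (n : Int) + 1 = 5) := by omega
          have hstep : (5 : Int) - (n : Int) + 1 = 5 - ((n - 1 : Nat) : Int) := by omega
          simp only [hc, if_true, hstep]
          rw [ih cs (n-1) (acc ++ [c]) hrest (by omega) (by omega)]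
          have hn1' : ¬ (n ≤ 1) := by omega
          simp only [pvCut, hc, if_true, hn1', if_false, List.append_assoc,
            List.singleton_append]
          rw [if_neg (by omega : ¬ ((5:Int) - ((n - 1 : Nat) : Int) = 5))]
      · simp only [hc, Bool.false_eq_true, if_false]
        rw [ih cs n (acc ++ [c]) hrest hn1 hn5]
        simp [pvCut, hc]

lemma pvFilterMap_eq (s : List Char) :
    ∀ (idxs : List Int) (r : List Char),
      idxs.map (PySem.List.pyGet? s) = r.map some →
      idxs.filterMap (PySem.List.pyGet? s) = r := by
  intro idxs
  induction idxs with
  | nil => intro r h; cases r <;> simp_all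
  | cons i rest ih =>
    intro r h
    cases r with
    | nil => simp at h
    | cons c cs =>
      simp only [List.map_cons, List.cons.injEq] at h
      obtain ⟨hi, hrest⟩ := h
      simp [hi, ih cs hrest]

lemma pvMap_range_nonneg (s : List Char) (lo : Int) (h0 : 0 ≤ lo) :
    (PySem.List.pyRange lo ((s.length : Int))).map (PySem.List.pyGet? s)
      = (s.drop lo.toNat).map some := by
  rcases le_or_gt lo (s.length : Int) with hle | hgt
  · have h1 : (PySem.List.pyRange lo ((s.length : Int))).map (PySem.List.pyGet? s)
        = (PySem.List.pyRange lo ((s.length : Int))).map (fun j => some (PySem.List.pyGetD s j 'a')) := by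
      apply List.map_congr_left
      intro j hj
      rw [PySem.List.mem_pyRange_one] at hj
      obtain ⟨hj1, hj2⟩ := hj
      rw [PySem.List.pyGet?_eq_some_getElem s (by omega) hj2,
          PySem.List.pyGetD_eq_getElem s 'a' (by omega) hj2]
    rw [h1, ← PySem.List.map_pyGetD_pyRange' s 'a' h0, List.map_map]
    rfl
  · rw [PySem.List.pyRange_one_eq_nil (by omega)]
    rw [List.drop_eq_nil_of_le (by omega)]
    simp

lemma pvMap_range_neg (s : List Char) :
    ∀ (m : Nat), m ≤ s.length →
      (PySem.List.pyRange (-(m : Int)) 0).map (PySem.List.pyGet? s)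
        = (s.drop (s.length - m)).map some := by
  intro m
  induction m with
  | zero => simp [PySem.List.pyRange_one_eq_nil]
  | succ k ihk =>
    intro hm
    rw [PySem.List.pyRange_one_cons (by omega)]
    have : (-((k+1 : Nat) : Int)) + 1 = -((k : Nat) : Int) := by push_cast; ring
    rw [List.map_cons, this, ihk (by omega)]
    rw [PySem.List.pyGet?_neg_natCast s (k+1) (by omega) hm]
    have hlt : s.length - (k+1) < s.length := by omega
    rw [List.getElem?_eq_getElem hlt]
    rw [List.drop_eq_getElem_cons hlt]
    simp only [List.map_cons]
    have he : s.length - (k+1) + 1 = s.length - k := by omega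
    rw [he]

lemma pvAidx_ge (r : List Char) (k : Int) :
    ∀ x ∈ ((PySem.List.enumerate r k).filter (fun p => PySem.Chars.isalpha p.2)).map (fun p => p.1),
      k ≤ x := by
  intro x hx
  simp only [List.mem_map, List.mem_filter] at hx
  obtain ⟨p, ⟨hp, _⟩, rfl⟩ := hx
  rw [PySem.List.mem_enumerate_iff] at hp
  obtain ⟨j, hj, rfl⟩ := hp
  omega

lemma pvAlt_core (r : List Char) :
    ∀ (k : Int) (n : Nat), 0 ≤ k → 1 ≤ n →
      (if n ≤ (((PySem.List.enumerate r k).filter (fun p => PySem.Chars.isalpha p.2)).map (fun p => p.1)).length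
       then r.take (((((PySem.List.enumerate r k).filter (fun p => PySem.Chars.isalpha p.2)).map (fun p => p.1)).getD (n - 1) 0 - k).toNat + 1)
       else r) = pvCut n r := by
  induction r with
  | nil =>
    intro k n _ hn
    simp only [PySem.List.enumerate_nil, List.filter_nil, List.map_nil, List.length_nil]
    rw [if_neg (by omega)]
    rfl
  | cons c cs ih =>
    intro k n hk hn
    rw [PySem.List.enumerate_cons]
    simp only [List.filter_cons]
    by_cases hc : PySem.Chars.isalpha c = true
    · simp only [hc, if_true, List.map_cons, List.length_cons]
      by_cases h1 : n = 1
      · subst h1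
        rw [if_pos (by omega)]
        have h0 : (1:Nat) - 1 = 0 := rfl
        rw [h0, List.getD_cons_zero]
        have : ((k - k).toNat + 1) = 1 := by omega
        rw [this]
        simp [pvCut, hc]
      · have hgd : ((k :: ((PySem.List.enumerate cs (k+1)).filter (fun p => PySem.Chars.isalpha p.2)).map (fun p => p.1)).getD (n - 1) 0)
            = (((PySem.List.enumerate cs (k+1)).filter (fun p => PySem.Chars.isalpha p.2)).map (fun p => p.1)).getD (n - 1 - 1) 0 := by
          have : n - 1 = (n - 1 - 1) + 1 := by omega
          rw [this, List.getD_cons_succ]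
          have h2 : n - 1 - 1 + 1 - 1 = n - 1 - 1 := by omega
          rw [h2]
        rw [hgd]
        have ihs := ih (k+1) (n-1) (by omega) (by omega)
        by_cases hcond : n - 1 ≤ (((PySem.List.enumerate cs (k+1)).filter (fun p => PySem.Chars.isalpha p.2)).map (fun p => p.1)).length
        · rw [if_pos (by omega)]
          rw [if_pos hcond] at ihs
          have hxmem : (((PySem.List.enumerate cs (k+1)).filter (fun p => PySem.Chars.isalpha p.2)).map (fun p => p.1)).getD (n - 1 - 1) 0
              ∈ (((PySem.List.enumerate cs (k+1)).filter (fun p => PySem.Chars.isalpha p.2)).map (fun p => p.1)) := by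
            rw [List.getD_eq_getElem _ _ (by omega)]
            exact List.getElem_mem _
          have hx := pvAidx_ge cs (k+1) _ hxmem
          have hsplit : ((((PySem.List.enumerate cs (k+1)).filter (fun p => PySem.Chars.isalpha p.2)).map (fun p => p.1)).getD (n - 1 - 1) 0 - k).toNat + 1
              = ((((PySem.List.enumerate cs (k+1)).filter (fun p => PySem.Chars.isalpha p.2)).map (fun p => p.1)).getD (n - 1 - 1) 0 - (k+1)).toNat + 1 + 1 := by
            omega
          rw [hsplit, List.take_succ_cons, ihs]
          simp only [pvCut, hc, if_true]
          rw [if_neg (by omega : ¬ n ≤ 1)]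
        · rw [if_neg (by omega)]
          rw [if_neg hcond] at ihs
          simp only [pvCut, hc, if_true]
          rw [if_neg (by omega : ¬ n ≤ 1), ← ihs]
    · simp only [hc, Bool.false_eq_true, if_false]
      have ihs := ih (k+1) n (by omega) hn
      by_cases hcond : n ≤ (((PySem.List.enumerate cs (k+1)).filter (fun p => PySem.Chars.isalpha p.2)).map (fun p => p.1)).length
      · rw [if_pos hcond]
        rw [if_pos hcond] at ihs
        have hxmem : (((PySem.List.enumerate cs (k+1)).filter (fun p => PySem.Chars.isalpha p.2)).map (fun p => p.1)).getD (n - 1) 0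
            ∈ (((PySem.List.enumerate cs (k+1)).filter (fun p => PySem.Chars.isalpha p.2)).map (fun p => p.1)) := by
          rw [List.getD_eq_getElem _ _ (by omega)]
          exact List.getElem_mem _
        have hx := pvAidx_ge cs (k+1) _ hxmem
        have hsplit : ((((PySem.List.enumerate cs (k+1)).filter (fun p => PySem.Chars.isalpha p.2)).map (fun p => p.1)).getD (n - 1) 0 - k).toNat + 1
            = ((((PySem.List.enumerate cs (k+1)).filter (fun p => PySem.Chars.isalpha p.2)).map (fun p => p.1)).getD (n - 1) 0 - (k+1)).toNat + 1 + 1 := by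
          omega
        rw [hsplit, List.take_succ_cons, ihs]
        simp [pvCut, hc]
      · rw [if_neg hcond]
        rw [if_neg hcond] at ihs
        simp only [pvCut, hc, Bool.false_eq_true, if_false]
        rw [← ihs]

-- B on any region r produced by the index scan equals pvCut 5 r.
lemma pvB_eq (f : String) (a : Int) (r : List Char)
    (hmap : (PySem.List.pyRange a ((f.toList.length : Int)) 1).map (PySem.List.pyGet? f.toList) = r.map some) :
    get_valid_group_str_alt f a = String.ofList (pvCut 5 r) := by
  simp only [get_valid_group_str_alt]
  rw [pvFilterMap_eq f.toList _ r hmap]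
  have core := pvAlt_core r 0 5 le_rfl (by omega)
  simp only [show (5:Nat) - 1 = 4 from rfl, sub_zero] at core
  by_cases hcond : 5 ≤ (((PySem.List.enumerate r 0).filter (fun p => PySem.Chars.isalpha p.2)).map (fun p => p.1)).length
  · rw [if_pos hcond] at core
    rw [if_pos hcond]
    have hm : (((PySem.List.enumerate r 0).filter (fun p => PySem.Chars.isalpha p.2)).map (fun p => p.1)).getD 4 0
        ∈ ((PySem.List.enumerate r 0).filter (fun p => PySem.Chars.isalpha p.2)).map (fun p => p.1) := by
      rw [List.getD_eq_getElem _ _ (by omega)]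
      exact List.getElem_mem _
    have hx := pvAidx_ge r 0 _ hm
    have ht : ((((PySem.List.enumerate r 0).filter (fun p : Int × Char => PySem.Chars.isalpha p.2)).map (fun p : Int × Char => p.1)).getD 4 0 + 1).toNat
        = ((((PySem.List.enumerate r 0).filter (fun p : Int × Char => PySem.Chars.isalpha p.2)).map (fun p : Int × Char => p.1)).getD 4 0).toNat + 1 := by omega
    rw [ht]
    exact congrArg _ core
  · rw [if_neg hcond] at core
    rw [if_neg hcond, Int.toNat_natCast, List.take_length]
    exact congrArg _ core

lemma pvA_eq (f : String) (a : Int) (r : List Char)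
    (hmap : (PySem.List.pyRange a ((f.toList.length : Int)) 1).map (PySem.List.pyGet? f.toList) = r.map some) :
    get_valid_group_str f a = String.ofList (pvCut 5 r) := by
  unfold get_valid_group_str
  have h := pvALoop_eq_cut f.toList _ r 5 [] hmap (by omega) (by omega)
  simp only [show ((5:Nat):Int) = 5 from rfl, sub_self, List.nil_append] at h
  rw [h]

-- The region the scan visits: a suffix for a ≥ 0, and (wrapping negative indexing) suffix ++ whole string for a < 0.
lemma pvMap_region (f : String) (a : Int) (ha : -(f.toList.length : Int) ≤ a) :
    ∃ r : List Char,
      (PySem.List.pyRange a ((f.toList.length : Int)) 1).map (PySem.List.pyGet? f.toList) = r.map some := by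
  rcases le_or_gt 0 a with h0 | h0
  · exact ⟨f.toList.drop a.toNat, pvMap_range_nonneg f.toList a h0⟩
  · refine ⟨f.toList.drop ((f.toList.length : Int) + a).toNat ++ f.toList, ?_⟩
    have hm1 : (-a).toNat ≤ f.toList.length := by omega
    have hsplit := PySem.List.pyRange_one_append a 0 ((f.toList.length : Int)) (by omega) (by omega)
    rw [hsplit, List.map_append, List.map_append]
    congr 1
    · have hneg := pvMap_range_neg f.toList (-a).toNat hm1
      have hax : -(((-a).toNat : Nat) : Int) = a := by omega
      rw [hax] at hneg
      have hidx : f.toList.length - (-a).toNat = ((f.toList.length : Int) + a).toNat := by omega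
      rw [hidx] at hneg
      exact hneg
    · have h0' := pvMap_range_nonneg f.toList 0 le_rfl
      simpa using h0'

-- ===== VERDICT =====
theorem get_valid_group_str_spec : Claim_equal_get_valid_group_str := by
  unfold Claim_equal_get_valid_group_str
  intro f a _ hpre
  unfold Pre_get_valid_group_str at hpre
  obtain ⟨r, hmap⟩ := pvMap_region f a hpre
  unfold Spec_get_valid_group_str
  rw [pvA_eq f a r hmap, pvB_eq f a r hmap]
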